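-- pv_equiv track=rewrite | github.com/ComedicChimera/Null-Discord-Bot | modules/math/strmath.py | get_formatted_line
-- ===== SOURCE A (Python) =====
-- def get_formatted_line(text, token_info):
--     lines = text.split('\n')
--     pos = 0
--     token_ndx = 0
--     line = 0
--     for item in lines:
--         if token_info[1] > pos + len(lines[line]):
--             pos += len(item)
--             line += 1
--         else:
--             token_ndx = token_info[1] - pos
--             break
--     base = ' ' * token_ndx + '^' * len(token_info[0])
--     return lines[line] + '\n' + base
-- ===== SOURCE B (Python) =====
-- def get_formatted_line(text, token_info):
--     # Prefix-sum of line lengths (newlines excluded, as in A) + binary search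
--     # for the first line whose end offset reaches the token position.
--     lines = text.split('\n')
--     target = token_info[1]
--     ends = []
--     total = 0
--     for l in lines:
--         total += len(l)
--         ends.append(total)
--     lo, hi = 0, len(lines)
--     while lo < hi:
--         mid = (lo + hi) // 2
--         if ends[mid] < target:
--             lo = mid + 1
--         else:
--             hi = mid
--     base_off = ends[lo - 1] if lo > 0 else 0
--     caret = ' ' * (target - base_off) + '^' * len(token_info[0])
--     return lines[lo] + '\n' + caret
-- ===== Notes on version B (the rewrite author's own statement) =====
-- stated objective: alternative
-- what changed: Replaces A's linear scan over the lines (running offset, break on the containing line) by a prefix-sum array of cumulative line lengths plus a binary search (bisect_left by hand) for the first line whose end offset reaches the token position.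
import Mathlib
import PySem

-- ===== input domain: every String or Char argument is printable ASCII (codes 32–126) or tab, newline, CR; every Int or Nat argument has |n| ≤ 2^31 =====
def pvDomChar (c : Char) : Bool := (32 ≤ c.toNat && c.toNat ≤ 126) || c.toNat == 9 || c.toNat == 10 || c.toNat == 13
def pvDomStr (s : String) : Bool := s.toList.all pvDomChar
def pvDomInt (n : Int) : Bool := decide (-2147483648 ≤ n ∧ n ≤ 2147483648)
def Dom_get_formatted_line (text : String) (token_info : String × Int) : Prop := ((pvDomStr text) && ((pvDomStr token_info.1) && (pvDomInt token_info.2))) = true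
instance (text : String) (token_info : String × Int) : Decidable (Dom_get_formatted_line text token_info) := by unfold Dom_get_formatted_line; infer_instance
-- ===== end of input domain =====

-- B replaces A's linear scan for the containing line by a prefix-sum array of
-- cumulative line lengths plus a hand-written binary search (same return value).
-- Both programs raise IndexError when the token position overruns the text
-- (excluded by Pre_); equivalence is about the return value.

-- ' ' * n / '^' * n : Python string repetition; exact (n ≤ 0 gives "").
def pyStrMul (s : String) (n : Int) : String := String.ofList (List.replicate n.toNat s.toList).flatten

-- ===== PORT A =====
-- the for-loop of A: state (pos, token_ndx, line); returns (token_ndx, line).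
-- 'lines[line]' is ported as pyGet? … |>.getD "" (the none case is unreachable:
-- inside the loop line never exceeds the current iteration index).
def aLoop (lines : List String) (k : Int) : List String → Int → Int → Int → Int × Int
  | [], _pos, tn, line => (tn, line)
  | item :: rest, pos, tn, line =>
    if k > pos + PySem.Str.len ((PySem.List.pyGet? lines line).getD "") then
      aLoop lines k rest (pos + PySem.Str.len item) tn (line + 1)
    else (k - pos, line)

def get_formatted_line (text : String) (token_info : String × Int) : String :=
  let lines := (PySem.Str.split? text "\n").getD []
  let r := aLoop lines token_info.2 lines 0 0 0
  let base := pyStrMul " " r.1 ++ pyStrMul "^" (PySem.Str.len token_info.1)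
  match PySem.List.pyGet? lines r.2 with      -- lines[line]; none = IndexError, outside Pre_
  | some l => l ++ "\n" ++ base
  | none => ""

-- ===== PORT B =====
-- the ends-building loop of B: 'total += len(l); ends.append(total)'
def bEnds : List String → Int → List Int
  | [], _total => []
  | l :: rest, total => (total + PySem.Str.len l) :: bEnds rest (total + PySem.Str.len l)

-- the while-loop binary search of B ('ends[mid]' is in range whenever hi ≤ len ends)
def bSearch (ends : List Int) (target : Int) (lo hi : Nat) : Nat :=
  if lo < hi then
    let mid := (lo + hi) / 2
    if (PySem.List.pyGet? ends (mid : Int)).getD 0 < target then bSearch ends target (mid + 1) hi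
    else bSearch ends target lo mid
  else lo
termination_by hi - lo
decreasing_by all_goals omega

def get_formatted_line_alt (text : String) (token_info : String × Int) : String :=
  let lines := (PySem.Str.split? text "\n").getD []
  let ends := bEnds lines 0
  let lo := bSearch ends token_info.2 0 lines.length
  let base_off := if lo > 0 then (PySem.List.pyGet? ends ((lo : Int) - 1)).getD 0 else 0
  let caret := pyStrMul " " (token_info.2 - base_off) ++ pyStrMul "^" (PySem.Str.len token_info.1)
  match PySem.List.pyGet? lines (lo : Int) with  -- lines[lo]; none = IndexError, outside Pre_
  | some l => l ++ "\n" ++ caret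
  | none => ""

-- ===== PRECONDITION & SPEC =====
-- Pre_ excludes exactly the inputs where Python A raises IndexError: the token
-- position exceeds the total length of the lines (len(text) minus the newlines).
def Pre_get_formatted_line (text : String) (token_info : String × Int) : Prop :=
  token_info.2 ≤ (((PySem.Str.split? text "\n").getD []).map PySem.Str.len).sum
instance (text : String) (token_info : String × Int) : Decidable (Pre_get_formatted_line text token_info) := by unfold Pre_get_formatted_line; infer_instance

def pvWitness_get_formatted_line : String × (String × Int) := ("ab\ncd", ("x", 3))

def Spec_get_formatted_line (text : String) (token_info : String × Int) (out : String) : Prop := out = get_formatted_line_alt text token_info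
instance (text : String) (token_info : String × Int) (out : String) : Decidable (Spec_get_formatted_line text token_info out) := by unfold Spec_get_formatted_line; infer_instance

-- ===== CLAIM (what is proved, stated in full; the proofs are below) =====
def Claim_equal_get_formatted_line : Prop := ∀ (text : String) (token_info : String × Int), Dom_get_formatted_line text token_info → Pre_get_formatted_line text token_info → Spec_get_formatted_line text token_info (get_formatted_line text token_info)

-- ===== LEMMAS AND PROOFS =====

-- length of the (· < k)-prefix of a list: the break index of A and the result of B's bisect
def tw (k : Int) : List Int → Nat
  | [] => 0
  | e :: es => if e < k then tw k es + 1 else 0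

theorem tw_le_len (k : Int) (es : List Int) : tw k es ≤ es.length := by
  induction es with
  | nil => simp [tw]
  | cons e es ih =>
    by_cases hek : e < k
    · simp only [tw, if_pos hek, List.length_cons]; omega
    · simp only [tw, if_neg hek, List.length_cons]; omega

theorem tw_lt (k : Int) (es : List Int) (j : Nat) (hj : j < tw k es) :
    ∃ e, es[j]? = some e ∧ e < k := by
  induction es generalizing j with
  | nil => simp [tw] at hj
  | cons e es ih =>
    simp only [tw] at hj
    split at hj
    · cases j with
      | zero => exact ⟨e, by simp, by assumption⟩
      | succ j => simpa using ih j (by omega)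
    · omega

theorem tw_get (k : Int) (es : List Int) (h : tw k es < es.length) :
    ∃ e, es[tw k es]? = some e ∧ ¬ e < k := by
  induction es with
  | nil => simp at h
  | cons e es ih =>
    by_cases hek : e < k
    · simp only [tw, if_pos hek, List.length_cons] at h ⊢
      simpa using ih (by omega)
    · simp only [tw, if_neg hek] at h ⊢
      exact ⟨e, by simp, hek⟩

theorem str_len_nonneg (s : String) : 0 ≤ PySem.Str.len s := by
  simp [PySem.Str.len]

theorem sum_take_mono (ls : List Int) (h0 : ∀ x ∈ ls, 0 ≤ x) :
    ∀ m n, m ≤ n → (ls.take m).sum ≤ (ls.take n).sum := by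
  induction ls with
  | nil => simp
  | cons x xs ih =>
    intro m n hmn
    cases m with
    | zero =>
      simp only [List.take_zero, List.sum_nil]
      have : ∀ y ∈ (x :: xs).take n, 0 ≤ y := fun y hy => h0 y (List.mem_of_mem_take hy)
      exact List.sum_nonneg this
    | succ m =>
      cases n with
      | zero => omega
      | succ n =>
        simp only [List.take_succ_cons, List.sum_cons]
        have := ih (fun y hy => h0 y (List.mem_cons_of_mem _ hy)) m n (by omega)
        omega

-- value of B's ends array: cumulative line lengths
theorem bEnds_get (lines : List String) : ∀ (pos : Int) (j : Nat), j < lines.length →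
    (bEnds lines pos)[j]? = some (pos + ((lines.take (j + 1)).map PySem.Str.len).sum) := by
  induction lines with
  | nil => intro pos j h; simp at h
  | cons l rest ih =>
    intro pos j h
    cases j with
    | zero => simp [bEnds]
    | succ j =>
      simp only [bEnds, List.getElem?_cons_succ, List.take_succ_cons, List.map_cons,
        List.sum_cons]
      rw [ih (pos + PySem.Str.len l) j (by simpa using h)]
      ring_nf

theorem bEnds_length (lines : List String) : ∀ pos, (bEnds lines pos).length = lines.length := by
  induction lines with
  | nil => intro _; rfl
  | cons l rest ih => intro pos; simp [bEnds, ih]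

-- B's binary search returns the break index tw
theorem bSearch_eq (lines : List String) (k : Int) :
    ∀ lo hi, lo ≤ tw k (bEnds lines 0) → tw k (bEnds lines 0) ≤ hi →
      hi ≤ (bEnds lines 0).length → bSearch (bEnds lines 0) k lo hi = tw k (bEnds lines 0) := by
  intro lo hi
  fun_induction bSearch (bEnds lines 0) k lo hi with
  | case1 lo hi hlt mid hmidlt ih =>
    intro h1 h2 h3
    -- ends[mid] < k ⇒ mid < tw
    have hmid : mid < hi := by omega
    have hmlen : mid < (bEnds lines 0).length := by omega
    have hget : (bEnds lines 0)[mid]? = some ((bEnds lines 0)[mid]'hmlen) := by simp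
    have hgd : (PySem.List.pyGet? (bEnds lines 0) (mid : Int)).getD 0 = (bEnds lines 0)[mid]'hmlen := by
      rw [PySem.List.pyGet?_natCast, hget]; rfl
    have hlt' : (bEnds lines 0)[mid]'hmlen < k := by rwa [hgd] at hmidlt
    have hmidtw : mid < tw k (bEnds lines 0) := by
      by_contra hcon
      have htwlt : tw k (bEnds lines 0) < (bEnds lines 0).length := by omega
      obtain ⟨e, he, hek⟩ := tw_get k (bEnds lines 0) htwlt
      -- monotone: ends[tw] ≤ ends[mid]
      have htl : tw k (bEnds lines 0) < lines.length := by rwa [bEnds_length] at htwlt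
      have hml : mid < lines.length := by rwa [bEnds_length] at hmlen
      have h1' := bEnds_get lines 0 (tw k (bEnds lines 0)) htl
      have h2' := bEnds_get lines 0 mid hml
      rw [h1'] at he
      have hnn : ∀ x ∈ lines.map PySem.Str.len, 0 ≤ x := by
        intro x hx; obtain ⟨s, _, rfl⟩ := List.mem_map.mp hx; exact str_len_nonneg s
      have hmono := sum_take_mono (lines.map PySem.Str.len) hnn
        (tw k (bEnds lines 0) + 1) (mid + 1) (by omega)
      rw [← List.map_take, ← List.map_take] at hmono
      rw [List.getElem?_eq_getElem hmlen] at h2'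
      have hmv := Option.some.inj h2'
      have hev := Option.some.inj he
      omega
    exact ih (by omega) h2 h3
  | case2 lo hi hlt mid hmidge ih =>
    intro h1 h2 h3
    have hmidtw : tw k (bEnds lines 0) ≤ mid := by
      by_contra hcon
      obtain ⟨e, he, hek⟩ := tw_lt k (bEnds lines 0) mid (by omega)
      have hgd : (PySem.List.pyGet? (bEnds lines 0) (mid : Int)).getD 0 = e := by
        rw [PySem.List.pyGet?_natCast, he]; rfl
      rw [hgd] at hmidge
      omega
    exact ih h1 hmidtw (by omega)
  | case3 lo hi hge =>
    intro h1 h2 h3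
    omega

-- A's loop computes (k - offset-before-line tw, start-line + tw)
theorem aLoop_eq (k : Int) : ∀ (items lines : List String) (ln : Nat) (pos tn : Int),
    items = lines.drop ln →
    aLoop lines k items pos tn (ln : Int) =
      ((if tw k (bEnds items pos) = items.length then tn
        else k - (pos + ((items.take (tw k (bEnds items pos))).map PySem.Str.len).sum)),
       (ln : Int) + (tw k (bEnds items pos) : Int)) := by
  intro items
  induction items with
  | nil => intro lines ln pos tn _; simp [aLoop, tw, bEnds]
  | cons item rest ih =>
    intro lines ln pos tn hdrop
    have hget : PySem.List.pyGet? lines (ln : Int) = some item := by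
      rw [PySem.List.pyGet?_natCast]
      have : (lines.drop ln)[0]? = some item := by rw [← hdrop]; rfl
      rw [List.getElem?_drop] at this
      simpa using this
    simp only [aLoop, hget, Option.getD_some, bEnds, tw]
    by_cases hc : k > pos + PySem.Str.len item
    · have hlt : pos + PySem.Str.len item < k := hc
      rw [if_pos hc, if_pos hlt]
      have hdrop' : rest = lines.drop (ln + 1) := by
        have := congrArg List.tail hdrop
        simpa [List.tail_drop] using this
      have := ih lines (ln + 1) (pos + PySem.Str.len item) tn hdrop'
      push_cast at this ⊢
      rw [this, Prod.mk.injEq]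
      simp only [List.length_cons]
      constructor
      · split
        · rw [if_pos (by omega)]
        · rw [if_neg (by omega)]
          simp only [List.take_succ_cons, List.map_cons, List.sum_cons]
          ring_nf
      · ring
    · have hnlt : ¬ pos + PySem.Str.len item < k := hc
      rw [if_neg hc, if_neg hnlt]
      simp

-- base_off of B equals the cumulative offset before line tw
theorem base_off_eq (lines : List String) (k : Int)
    (T : Nat) (hT : T = tw k (bEnds lines 0)) (hTlen : T ≤ lines.length) :
    (if T > 0 then (PySem.List.pyGet? (bEnds lines 0) ((T : Int) - 1)).getD 0 else 0) =
      ((lines.take T).map PySem.Str.len).sum := by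
  cases hT0 : T with
  | zero => simp
  | succ T' =>
    rw [if_pos (by omega)]
    have hlt : T' < lines.length := by omega
    have hcast : ((T' + 1 : Nat) : Int) - 1 = ((T' : Nat) : Int) := by push_cast; ring
    rw [hcast, PySem.List.pyGet?_natCast]
    have hlen : T' < (bEnds lines 0).length := by rw [bEnds_length]; omega
    have := bEnds_get lines 0 T' hlt
    rw [this]
    simp

-- ===== VERDICT (by name: the statement is the Claim_ definition above) =====
theorem get_formatted_line_spec : Claim_equal_get_formatted_line := by
  unfold Claim_equal_get_formatted_line
  intro text token_info _hdom _hpre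
  unfold Spec_get_formatted_line
  unfold get_formatted_line get_formatted_line_alt
  set lines := (PySem.Str.split? text "\n").getD [] with hlines
  set k := token_info.2 with hk
  set T := tw k (bEnds lines 0) with hT
  have hTle : T ≤ lines.length := by
    rw [hT, ← bEnds_length lines 0]; exact tw_le_len _ _
  have hA := aLoop_eq k lines lines 0 0 0 (by simp)
  have hB := bSearch_eq lines k 0 lines.length (by omega)
      (by rw [← hT]; exact hTle) (by simp [bEnds_length])
  simp only [Nat.cast_zero] at hA
  simp only [hA, hB, ← hT]
  have hbase := base_off_eq lines k T hT hTle
  by_cases hfull : T = lines.length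
  · -- no break in A / lo = len(lines) in B: both index out of range and return ""
    have hnone : PySem.List.pyGet? lines ((T : Nat) : Int) = none := by
      rw [PySem.List.pyGet?_natCast, hfull]
      simp
    simp only [zero_add, hnone]
  · -- the normal case: the token lies on line T
    rw [if_neg hfull]
    have hsome : ∃ l, PySem.List.pyGet? lines ((T : Nat) : Int) = some l := by
      rw [PySem.List.pyGet?_natCast]
      exact ⟨lines[T]'(by omega), by simp⟩
    obtain ⟨l, hl⟩ := hsome
    simp only [zero_add, hl, hbase]
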